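-- pv_equiv track=rewrite | github.com/danon/agile-engine | ag/solution.py | __parity_analysis
-- ===== SOURCE A (Python) =====
-- def __parity_analysis(input: str) -> tuple[int, int]:
--     evens = 0
--     odds = 0
--     for index, char in enumerate(input):
--         if char == 'B':
--             if index % 2 == 0:
--                 evens += 1
--             else:
--                 odds += 1
--     return evens, odds
-- ===== SOURCE B (Python) =====
-- def __parity_analysis(input: str) -> tuple[int, int]:
--     evens = input[::2].count('B')
--     odds = input[1::2].count('B')
--     return evens, odds
-- ===== Notes on version B (the rewrite author's own statement) =====
-- stated objective: faster
-- what changed: Replaces the single enumerate loop with an index-parity branch by slicing the string into its even-index and odd-index subsequences and counting the target character in each with str.count.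
import Mathlib
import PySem

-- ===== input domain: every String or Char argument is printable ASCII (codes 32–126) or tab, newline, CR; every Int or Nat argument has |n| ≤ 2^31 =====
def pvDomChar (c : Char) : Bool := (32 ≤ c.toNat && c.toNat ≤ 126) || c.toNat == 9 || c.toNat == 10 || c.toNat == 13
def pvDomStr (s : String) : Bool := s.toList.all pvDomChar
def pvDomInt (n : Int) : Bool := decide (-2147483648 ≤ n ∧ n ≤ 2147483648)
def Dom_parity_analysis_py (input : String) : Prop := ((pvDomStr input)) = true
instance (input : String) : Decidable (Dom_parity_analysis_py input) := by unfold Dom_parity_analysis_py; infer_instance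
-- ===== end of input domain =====

-- B counts 'B' in the even-index and odd-index slices (input[::2], input[1::2]) instead of one enumerate loop branching on index parity; same O(n) cost, more idiomatic.

-- ===== PORT A =====
def parity_analysis_py (input : String) : Int × Int :=
  (PySem.List.enumerate input.toList 0).foldl
    (fun (acc : Int × Int) p =>
      if p.2 = 'B' then
        if PySem.Int.mod p.1 2 = 0 then (acc.1 + 1, acc.2) else (acc.1, acc.2 + 1)
      else acc)
    (0, 0)

-- ===== PORT B =====
def parity_analysis_py_alt (input : String) : Int × Int :=
  -- input[::2] and input[1::2]: step 2 ≠ 0, so slice? always returns some; getD "" is only a totality guard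
  let evens : Int := (PySem.Str.count ((PySem.Str.slice? input none none 2).getD "") "B" : Int)
  let odds : Int := (PySem.Str.count ((PySem.Str.slice? input (some 1) none 2).getD "") "B" : Int)
  (evens, odds)

-- ===== PRECONDITION & SPEC =====
def Spec_parity_analysis_py (input : String) (out : Int × Int) : Prop := out = parity_analysis_py_alt input
instance (input : String) (out : Int × Int) : Decidable (Spec_parity_analysis_py input out) := by unfold Spec_parity_analysis_py; infer_instance

-- ===== CLAIM (what is proved, stated in full; the proofs are below) =====
def Claim_equal_parity_analysis_py : Prop := ∀ (input : String), Dom_parity_analysis_py input → Spec_parity_analysis_py input (parity_analysis_py input)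

-- ===== LEMMAS AND PROOFS =====

-- the even-index subsequence of a list
def pvEvens : List Char → List Char
  | [] => []
  | [a] => [a]
  | a :: _ :: rest => a :: pvEvens rest

theorem pvEvens_cons (x : Char) (xs : List Char) : pvEvens (x :: xs) = x :: pvEvens xs.tail := by
  cases xs <;> rfl

theorem pv_count_go : ∀ (fuel : Nat) (l : List Char) (acc : Nat),
    l.length ≤ fuel → PySem.Chars.count.go ['B'] fuel l acc = acc + l.count 'B' := by
  intro fuel
  induction fuel with
  | zero => intro l acc h; cases l with
    | nil => simp [PySem.Chars.count.go]
    | cons a t => simp at h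
  | succ n ih =>
    intro l acc h
    cases l with
    | nil => simp [PySem.Chars.count.go]
    | cons a t =>
      rw [PySem.Chars.count.go]
      by_cases hb : a = 'B'
      · subst hb
        simp [List.isPrefixOf, ih t _ (by simpa using h)]
        omega
      · have : (['B'].isPrefixOf (a :: t)) = false := by
          simp [List.isPrefixOf]; exact fun h' => hb h'.symm
        simp [this, ih t _ (by simpa using h), hb]

theorem pv_count_B (l : List Char) : PySem.Chars.count l ['B'] = l.count 'B' := by
  simp [PySem.Chars.count]
  simpa using pv_count_go l.length l 0 le_rfl

theorem pv_core (l : List Char) :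
    List.filterMap (fun k : Nat => l[2 * k]?) (List.range ((l.length + 1) / 2)) = pvEvens l := by
  induction l using pvEvens.induct with
  | case1 => simp [pvEvens]
  | case2 a => simp [pvEvens]
  | case3 a b rest ih =>
    have hc : ((a :: b :: rest).length + 1) / 2 = (rest.length + 1) / 2 + 1 := by
      simp; omega
    rw [hc, List.range_succ_eq_map, List.filterMap_cons, List.filterMap_map]
    simp only [pvEvens]
    norm_num
    rw [← ih]
    apply List.filterMap_congr
    intro k _
    have h2 : 2 * (k + 1) = 2 * k + 1 + 1 := by ring
    simp [h2]

theorem pv_sliceL1 (l : List Char) :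
    PySem.List.slice? l none none 2 = some (pvEvens l) := by
  rw [← pv_core l]
  simp only [PySem.List.slice?, PySem.List.sliceIndices]
  norm_num
  have hc : (if 0 < l.length then (((l.length : Int) + 2 - 1) / 2).toNat else 0) = (l.length + 1) / 2 := by
    split_ifs with h <;> omega
  rw [hc]
  apply List.filterMap_congr
  intro k _
  have : (2 * (k : Int)).toNat = 2 * k := by omega
  rw [this]

theorem pv_sliceL2 (l : List Char) :
    PySem.List.slice? l (some 1) none 2 = some (pvEvens l.tail) := by
  cases l with
  | nil => decide
  | cons a t =>
    simp only [PySem.List.slice?, PySem.List.sliceIndices]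
    norm_num
    rw [← pv_core t]
    have hc : (if 0 < t.length then (((t.length : Int) + 2 - 1) / 2).toNat else 0) = (t.length + 1) / 2 := by
      split_ifs with h <;> omega
    rw [hc]
    apply List.filterMap_congr
    intro k _
    have h2 : ((1 : Int) + 2 * (k : Int)).toNat = 2 * k + 1 := by omega
    simp [h2]

theorem pv_mod2 (x : Int) : PySem.Int.mod x 2 = x % 2 := by
  simp [PySem.Int.mod, Int.fmod_eq_emod_of_nonneg]

theorem pv_foldA (l : List Char) : ∀ (s e o : Int), PySem.Int.mod s 2 = 0 →
    (PySem.List.enumerate l s).foldl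
      (fun (acc : Int × Int) p =>
        if p.2 = 'B' then
          if PySem.Int.mod p.1 2 = 0 then (acc.1 + 1, acc.2) else (acc.1, acc.2 + 1)
        else acc)
      (e, o)
    = (e + ((pvEvens l).count 'B' : Int), o + ((pvEvens l.tail).count 'B' : Int)) := by
  induction l using pvEvens.induct with
  | case1 => intro s e o hs; simp [PySem.List.enumerate, pvEvens]
  | case2 a =>
    intro s e o hs
    rw [pv_mod2] at hs
    simp only [PySem.List.enumerate, pvEvens, pv_mod2, List.foldl_cons, List.foldl_nil, hs]
    by_cases hb : a = 'B' <;> simp [hb]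
  | case3 a b rest ih =>
    intro s e o hs
    rw [pv_mod2] at hs
    rw [PySem.List.enumerate_cons, PySem.List.enumerate_cons]
    simp only [List.foldl_cons, pv_mod2] at ih ⊢
    simp only [← Int.dvd_iff_emod_eq_zero] at ih
    have hd : (2:Int) ∣ s := by omega
    have hd1 : ¬ (2:Int) ∣ (s + 1) := by omega
    by_cases hb1 : a = 'B' <;> by_cases hb2 : b = 'B' <;>
      simp [hb1, hb2, hd, hd1, ih (s + 1 + 1) _ _ (by omega), pvEvens_cons, pvEvens] <;> omega

-- ===== VERDICT (by name: the statement is the Claim_ definition above) =====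
theorem parity_analysis_py_spec : Claim_equal_parity_analysis_py := by
  intro input _
  unfold Spec_parity_analysis_py parity_analysis_py parity_analysis_py_alt
  rw [pv_foldA input.toList 0 0 0 (by decide)]
  simp [PySem.Str.slice?, PySem.Chars.slice?_eq_listSlice?, pv_sliceL1, pv_sliceL2, pv_count_B]
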